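-- pv_equiv track=rewrite | github.com/MazurEgorMaksimovich/The-Funcktsyi | The_Funckciya-5.py | liberty_places_vverkh_vniz
-- ===== SOURCE A (Python) =====
-- def liberty_places_vverkh_vniz(w):
--
--     """Возвращает список свободных верхних и нижних мест в вагоне.
--     - Параметры:
--         - List[dict]: список купе в вагонах
--     - Вернуть:
--         - (str): список свободных верхних и нижних мест в вагоне
--     """
--
--     n = ''
--     m = ''
--     for i in w:
--         for j, l in i.items():
--             if l == 'None':
--                 if j % 2 == 0:
--                     n = n + str(j) + ', '
--                 else:
--                     m = m + str(j) + ', '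
--
--     return 'Нижние места: ' + str(m) + 'Верхние места: ' + str(n)
-- ===== SOURCE B (Python) =====
-- def liberty_places_vverkh_vniz(w):
--     items = [p for comp in w for p in comp.items()]
--
--     def halves(lo, hi):
--         # divide and conquer: (lower, upper) strings for items[lo:hi]
--         if hi - lo == 0:
--             return '', ''
--         if hi - lo == 1:
--             j, l = items[lo]
--             if l == 'None':
--                 if j % 2 == 0:
--                     return '', str(j) + ', '
--                 return str(j) + ', ', ''
--             return '', ''
--         mid = (lo + hi) // 2
--         l1, u1 = halves(lo, mid)
--         l2, u2 = halves(mid, hi)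
--         return l1 + l2, u1 + u2
--
--     lower, upper = halves(0, len(items))
--     return 'Нижние места: ' + lower + 'Верхние места: ' + upper
-- ===== Notes on version B (the rewrite author's own statement) =====
-- stated objective: alternative
-- what changed: A's single linear pass accumulating two growing strings is replaced by a divide-and-conquer recursion: the flattened item list is split in half, each half's (lower, upper) pair is computed recursively, and the pairs are concatenated.
import Mathlib
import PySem

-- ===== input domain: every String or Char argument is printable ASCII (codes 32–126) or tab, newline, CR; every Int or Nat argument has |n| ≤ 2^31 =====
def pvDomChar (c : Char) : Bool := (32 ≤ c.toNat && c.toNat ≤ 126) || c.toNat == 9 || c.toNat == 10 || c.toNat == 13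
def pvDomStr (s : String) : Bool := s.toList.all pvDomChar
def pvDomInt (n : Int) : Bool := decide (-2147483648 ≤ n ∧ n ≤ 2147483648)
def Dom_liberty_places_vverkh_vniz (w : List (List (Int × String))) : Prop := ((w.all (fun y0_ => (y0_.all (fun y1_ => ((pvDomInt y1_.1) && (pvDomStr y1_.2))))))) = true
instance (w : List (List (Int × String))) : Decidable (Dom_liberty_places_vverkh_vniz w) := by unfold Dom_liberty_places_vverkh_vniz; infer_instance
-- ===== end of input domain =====

-- B replaces A's single linear two-accumulator pass by a divide-and-conquer recursion over the flattened item list (objective: alternative).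


-- ===== PORT A =====
-- literal port: fold over compartments, inner fold over items, two string accumulators (n = even, m = odd)
def liberty_places_vverkh_vniz (w : List (List (Int × String))) : String :=
  let acc := w.foldl (fun (nm : String × String) i =>
    i.foldl (fun (nm : String × String) jl =>
      if jl.2 == "None" then
        if PySem.Int.mod jl.1 2 == 0 then
          (nm.1 ++ PySem.Int.toStr jl.1 ++ ", ", nm.2)
        else
          (nm.1, nm.2 ++ PySem.Int.toStr jl.1 ++ ", ")
      else nm) nm) ("", "")
  "Нижние места: " ++ acc.2 ++ "Верхние места: " ++ acc.1

-- ===== PORT B =====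
-- port of Source B's helper `halves`: Python recurses on the index range (lo, hi) of the fixed
-- flattened list with mid = (lo+hi)//2; here the segment items[lo:hi] is the list argument and
-- the relative split point (lo+hi)//2 - lo equals length/2 (sum and difference have equal parity)
def pvHalves (items : List (Int × String)) : String × String :=
  if items.length = 0 then ("", "")
  else if h1 : items.length = 1 then
    match items with
    | [] => ("", "")
    | (j, l) :: _ =>
      if l == "None" then
        if PySem.Int.mod j 2 == 0 then ("", PySem.Int.toStr j ++ ", ")
        else (PySem.Int.toStr j ++ ", ", "")
      else ("", "")
  else
    let mid := items.length / 2
    let a := pvHalves (items.take mid)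
    let b := pvHalves (items.drop mid)
    (a.1 ++ b.1, a.2 ++ b.2)
termination_by items.length
decreasing_by
  · simp only [List.length_take]; omega
  · simp only [List.length_drop]; omega

def liberty_places_vverkh_vniz_alt (w : List (List (Int × String))) : String :=
  let items := w.flatMap (fun comp => comp)
  let lu := pvHalves items
  "Нижние места: " ++ lu.1 ++ "Верхние места: " ++ lu.2

-- ===== PRECONDITION & SPEC =====
def Spec_liberty_places_vverkh_vniz (w : List (List (Int × String))) (out : String) : Prop := out = liberty_places_vverkh_vniz_alt w
instance (w : List (List (Int × String))) (out : String) : Decidable (Spec_liberty_places_vverkh_vniz w out) := by unfold Spec_liberty_places_vverkh_vniz; infer_instance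

-- ===== CLAIM (what is proved, stated in full; the proofs are below) =====
def Claim_equal_liberty_places_vverkh_vniz : Prop := ∀ (w : List (List (Int × String))), Dom_liberty_places_vverkh_vniz w → Spec_liberty_places_vverkh_vniz w (liberty_places_vverkh_vniz w)

-- ===== LEMMAS AND PROOFS =====

-- the free-seat numbers of one compartment
def pvFree (comp : List (Int × String)) : List Int :=
  comp.filterMap (fun jl => if jl.2 == "None" then some jl.1 else none)

-- the string a list of free-seat numbers contributes to the even (upper) / odd (lower) half
def pvEvenStr (js : List Int) : String :=
  String.join ((js.filter (fun j => PySem.Int.mod j 2 == 0)).map (fun j => PySem.Int.toStr j ++ ", "))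
def pvOddStr (js : List Int) : String :=
  String.join ((js.filter (fun j => PySem.Int.mod j 2 != 0)).map (fun j => PySem.Int.toStr j ++ ", "))

theorem pv_foldl_append (l : List String) (s : String) :
    l.foldl (· ++ ·) s = s ++ String.join l := by
  induction l generalizing s with
  | nil => simp [String.join, String.append_empty]
  | cons a l ih =>
    show l.foldl (· ++ ·) (s ++ a) = s ++ String.join (a :: l)
    rw [ih]
    show s ++ a ++ String.join l = s ++ List.foldl (· ++ ·) ("" ++ a) l
    rw [String.empty_append, ih, String.append_assoc]

theorem pv_join_cons (a : String) (l : List String) :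
    String.join (a :: l) = a ++ String.join l := by
  show List.foldl (· ++ ·) ("" ++ a) l = a ++ String.join l
  rw [String.empty_append, pv_foldl_append]

theorem pvFree_cons_none (j : Int) (l : String) (rest : List (Int × String)) (h : l = "None") :
    pvFree ((j, l) :: rest) = j :: pvFree rest := by
  unfold pvFree
  rw [List.filterMap_cons]
  simp [h]

theorem pvFree_cons_other (j : Int) (l : String) (rest : List (Int × String)) (h : ¬ l = "None") :
    pvFree ((j, l) :: rest) = pvFree rest := by
  unfold pvFree
  rw [List.filterMap_cons]
  simp [h]

theorem pvEvenStr_cons_even (j : Int) (js : List Int) (h : PySem.Int.mod j 2 = 0) :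
    pvEvenStr (j :: js) = (PySem.Int.toStr j ++ ", ") ++ pvEvenStr js := by
  unfold pvEvenStr
  rw [List.filter_cons, if_pos (beq_iff_eq.mpr h), List.map_cons, pv_join_cons]

theorem pvEvenStr_cons_odd (j : Int) (js : List Int) (h : ¬ PySem.Int.mod j 2 = 0) :
    pvEvenStr (j :: js) = pvEvenStr js := by
  unfold pvEvenStr
  rw [List.filter_cons, if_neg (fun hc => h (beq_iff_eq.mp hc))]

theorem pvOddStr_cons_even (j : Int) (js : List Int) (h : PySem.Int.mod j 2 = 0) :
    pvOddStr (j :: js) = pvOddStr js := by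
  unfold pvOddStr
  rw [List.filter_cons, if_neg (fun hc => (bne_iff_ne.mp hc) h)]

theorem pvOddStr_cons_odd (j : Int) (js : List Int) (h : ¬ PySem.Int.mod j 2 = 0) :
    pvOddStr (j :: js) = (PySem.Int.toStr j ++ ", ") ++ pvOddStr js := by
  unfold pvOddStr
  rw [List.filter_cons, if_pos (bne_iff_ne.mpr h), List.map_cons, pv_join_cons]

-- inner loop invariant: the compartment fold appends this compartment's two halves
theorem pv_inner (comp : List (Int × String)) (n m : String) :
    comp.foldl (fun (nm : String × String) jl =>
      if jl.2 == "None" then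
        if PySem.Int.mod jl.1 2 == 0 then
          (nm.1 ++ PySem.Int.toStr jl.1 ++ ", ", nm.2)
        else
          (nm.1, nm.2 ++ PySem.Int.toStr jl.1 ++ ", ")
      else nm) (n, m)
    = (n ++ pvEvenStr (pvFree comp), m ++ pvOddStr (pvFree comp)) := by
  induction comp generalizing n m with
  | nil =>
    show (n, m) = (n ++ pvEvenStr [], m ++ pvOddStr [])
    simp [pvEvenStr, pvOddStr, String.join, String.append_empty]
  | cons jl rest ih =>
    obtain ⟨j, l⟩ := jl
    rw [List.foldl_cons]
    by_cases h1 : l = "None"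
    · rw [if_pos (beq_iff_eq.mpr h1)]
      by_cases h2 : PySem.Int.mod j 2 = 0
      · rw [if_pos (beq_iff_eq.mpr h2), ih, pvFree_cons_none j l rest h1,
          pvEvenStr_cons_even j _ h2, pvOddStr_cons_even j _ h2]
        simp [String.append_assoc]
      · rw [if_neg (fun hc => h2 (beq_iff_eq.mp hc)), ih, pvFree_cons_none j l rest h1,
          pvEvenStr_cons_odd j _ h2, pvOddStr_cons_odd j _ h2]
        simp [String.append_assoc]
    · rw [if_neg (fun hc => h1 (beq_iff_eq.mp hc)), ih, pvFree_cons_other j l rest h1]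

theorem pvEvenStr_append (a b : List Int) : pvEvenStr (a ++ b) = pvEvenStr a ++ pvEvenStr b := by
  induction a with
  | nil => simp [pvEvenStr, String.join, String.empty_append]
  | cons x xs ih =>
    by_cases h : PySem.Int.mod x 2 = 0
    · rw [List.cons_append, pvEvenStr_cons_even x _ h, pvEvenStr_cons_even x _ h, ih]
      simp [String.append_assoc]
    · rw [List.cons_append, pvEvenStr_cons_odd x _ h, pvEvenStr_cons_odd x _ h, ih]

theorem pvOddStr_append (a b : List Int) : pvOddStr (a ++ b) = pvOddStr a ++ pvOddStr b := by
  induction a with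
  | nil => simp [pvOddStr, String.join, String.empty_append]
  | cons x xs ih =>
    by_cases h : PySem.Int.mod x 2 = 0
    · rw [List.cons_append, pvOddStr_cons_even x _ h, pvOddStr_cons_even x _ h, ih]
    · rw [List.cons_append, pvOddStr_cons_odd x _ h, pvOddStr_cons_odd x _ h, ih]
      simp [String.append_assoc]

theorem pvFree_append (a b : List (Int × String)) : pvFree (a ++ b) = pvFree a ++ pvFree b := by
  simp [pvFree]

-- outer loop invariant for A: the car fold appends the flattened halves
theorem pv_outer (w : List (List (Int × String))) (n m : String) :
    w.foldl (fun (nm : String × String) i =>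
      i.foldl (fun (nm : String × String) jl =>
        if jl.2 == "None" then
          if PySem.Int.mod jl.1 2 == 0 then
            (nm.1 ++ PySem.Int.toStr jl.1 ++ ", ", nm.2)
          else
            (nm.1, nm.2 ++ PySem.Int.toStr jl.1 ++ ", ")
        else nm) nm) (n, m)
    = (n ++ pvEvenStr (w.flatMap pvFree), m ++ pvOddStr (w.flatMap pvFree)) := by
  induction w generalizing n m with
  | nil =>
    show (n, m) = (n ++ pvEvenStr [], m ++ pvOddStr [])
    simp [pvEvenStr, pvOddStr, String.join, String.append_empty]
  | cons comp rest ih =>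
    rw [List.foldl_cons, pv_inner, ih, List.flatMap_cons, pvEvenStr_append, pvOddStr_append,
      String.append_assoc, String.append_assoc]

-- B's divide-and-conquer computes (odd half, even half) of the free seats of its segment
theorem pvHalves_eq (items : List (Int × String)) :
    pvHalves items = (pvOddStr (pvFree items), pvEvenStr (pvFree items)) := by
  induction items using pvHalves.induct with
  | case1 items h =>
    rw [pvHalves, if_pos h, List.length_eq_zero_iff.mp h]
    simp [pvFree, pvOddStr, pvEvenStr, String.join]
  | case2 h0 =>
    simp at h0
  | case3 j l tail hlen hn h2 h0 h1 =>
    have ht : tail = [] := by simpa using hlen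
    subst ht
    rw [pvHalves, if_neg h0, dif_pos h1]
    show (if (l == "None") = true then
        (if (PySem.Int.mod j 2 == 0) = true then ("", PySem.Int.toStr j ++ ", ")
         else (PySem.Int.toStr j ++ ", ", ""))
      else (("" : String), ("" : String))) = _
    rw [if_pos hn, if_pos h2, pvFree_cons_none j l [] (beq_iff_eq.mp hn),
      pvOddStr_cons_even j _ (beq_iff_eq.mp h2), pvEvenStr_cons_even j _ (beq_iff_eq.mp h2)]
    simp [pvFree, pvOddStr, pvEvenStr, String.join, String.append_empty]
  | case4 j l tail hlen hn h2 h0 h1 =>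
    have ht : tail = [] := by simpa using hlen
    subst ht
    have h2' : ¬ PySem.Int.mod j 2 = 0 := fun hc => h2 (beq_iff_eq.mpr hc)
    rw [pvHalves, if_neg h0, dif_pos h1]
    show (if (l == "None") = true then
        (if (PySem.Int.mod j 2 == 0) = true then ("", PySem.Int.toStr j ++ ", ")
         else (PySem.Int.toStr j ++ ", ", ""))
      else (("" : String), ("" : String))) = _
    rw [if_pos hn, if_neg h2, pvFree_cons_none j l [] (beq_iff_eq.mp hn),
      pvOddStr_cons_odd j _ h2', pvEvenStr_cons_odd j _ h2']
    simp [pvFree, pvOddStr, pvEvenStr, String.join, String.append_empty]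
  | case5 j l tail hlen hn h0 h1 =>
    have ht : tail = [] := by simpa using hlen
    subst ht
    rw [pvHalves, if_neg h0, dif_pos h1]
    show (if (l == "None") = true then
        (if (PySem.Int.mod j 2 == 0) = true then ("", PySem.Int.toStr j ++ ", ")
         else (PySem.Int.toStr j ++ ", ", ""))
      else (("" : String), ("" : String))) = _
    rw [if_neg hn, pvFree_cons_other j l [] (fun hc => hn (beq_iff_eq.mpr hc))]
    simp [pvFree, pvOddStr, pvEvenStr, String.join]
  | case6 items h0 h1 mid ih1 ih2 =>
    rw [pvHalves, if_neg h0, dif_neg h1]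
    show ((pvHalves (List.take mid items)).1 ++ (pvHalves (List.drop mid items)).1,
          (pvHalves (List.take mid items)).2 ++ (pvHalves (List.drop mid items)).2)
        = (pvOddStr (pvFree items), pvEvenStr (pvFree items))
    rw [ih1, ih2]
    conv_rhs => rw [← List.take_append_drop mid items]
    rw [pvFree_append, pvOddStr_append, pvEvenStr_append]

-- ===== VERDICT (by name: the statement is the Claim_ definition above) =====
theorem liberty_places_vverkh_vniz_spec : Claim_equal_liberty_places_vverkh_vniz := by
  intro w _
  show liberty_places_vverkh_vniz w = liberty_places_vverkh_vniz_alt w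
  unfold liberty_places_vverkh_vniz liberty_places_vverkh_vniz_alt
  simp only
  rw [pv_outer, pvHalves_eq]
  have hfl : pvFree (w.flatMap (fun comp => comp)) = w.flatMap pvFree := by
    unfold pvFree
    rw [List.filterMap_flatMap]
  rw [hfl, String.empty_append, String.empty_append]
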